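-- pv_equiv track=rewrite | github.com/cliffyjoe25-lgtm/sppz | source/spz-twitter-nitter.py | is_about_other_country
-- ===== SOURCE A (Python) =====
-- def is_about_other_country(text):
--     """Check if content is about other countries (not Israel)"""
--     text = text.lower()
--     other_countries = [
--         # Ukraine
--         'ukraine', 'ukrainian', 'kyiv', 'kharkiv', 'odesa', 'odessa', 'luhansk', 'donetsk', 'kiev',
--         # Russia
--         'russia', 'russian', 'putin', 'kremlin', 'moscow', 'vladimir',
--         # Europe
--         'france', 'french', 'macron', 'paris', 'germany', 'german', 'merkel', 'scholz', 'berlin',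
--         'uk', 'british', 'britain', 'england', 'london', 'boris johnson', 'rishi sunak',
--         'italy', 'italian', 'rome', 'meloni', 'spain', 'spanish', 'madrid', 'poland', 'sweden',
--         'norway', 'denmark', 'netherlands', 'belgium', 'switzerland', 'austria',
--         # Asia
--         'china', 'chinese', 'beijing', 'xi jinping', 'japan', 'japanese', 'tokyo',
--         'south korea', 'korean', 'seoul', 'north korea', 'pyongyang', 'kim jong',
--         'india', 'indian', 'modi', 'pakistan', 'bangladesh', 'thailand', 'vietnam',
--         'singapore', 'malaysia', 'indonesia', 'philippines', 'myanmar', 'cambodia',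
--         # Middle East (non-Israel)
--         'iran', 'iranian', 'tehran', 'iraq', 'iraqi', 'baghdad', 'syria', 'syrian', 'damascus', 'assad',
--         'lebanon', 'lebanese', 'beirut', 'hezbollah', 'jordan', 'jordanian', 'amman',
--         'egypt', 'egyptian', 'cairo', 'turkey', 'turkish', 'erdogan', 'istanbul', 'ankara',
--         'saudi', 'saudi arabia', 'riyadh', 'uae', 'emirates', 'dubai', 'qatar', 'doha',
--         'kuwait', 'bahrain', 'oman', 'yemen', 'yemeni', 'houthi',
--         # Americas
--         'usa', 'united states', 'america', 'american', 'biden', 'canada', 'canadian', 'trudeau',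
--         'mexico', 'mexican', 'brazil', 'brazilian', 'lula', 'argentina', 'chile', 'colombia',
--         'venezuela', 'peru', 'bolivia', 'uruguay', 'paraguay',
--         # Africa
--         'south africa', 'nigeria', 'kenya', 'ethiopia', 'ghana', 'morocco', 'algeria', 'tunisia', 'libya', 'sudan',
--         # Australia
--         'australia', 'australian', 'new zealand',
--     ]
--     return any(kw in text for kw in other_countries)
-- ===== SOURCE B (Python) =====
-- _OTHER_COUNTRIES = [
--     # Ukraine
--     'ukraine', 'ukrainian', 'kyiv', 'kharkiv', 'odesa', 'odessa', 'luhansk', 'donetsk', 'kiev',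
--     # Russia
--     'russia', 'russian', 'putin', 'kremlin', 'moscow', 'vladimir',
--     # Europe
--     'france', 'french', 'macron', 'paris', 'germany', 'german', 'merkel', 'scholz', 'berlin',
--     'uk', 'british', 'britain', 'england', 'london', 'boris johnson', 'rishi sunak',
--     'italy', 'italian', 'rome', 'meloni', 'spain', 'spanish', 'madrid', 'poland', 'sweden',
--     'norway', 'denmark', 'netherlands', 'belgium', 'switzerland', 'austria',
--     # Asia
--     'china', 'chinese', 'beijing', 'xi jinping', 'japan', 'japanese', 'tokyo',
--     'south korea', 'korean', 'seoul', 'north korea', 'pyongyang', 'kim jong',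
--     'india', 'indian', 'modi', 'pakistan', 'bangladesh', 'thailand', 'vietnam',
--     'singapore', 'malaysia', 'indonesia', 'philippines', 'myanmar', 'cambodia',
--     # Middle East (non-Israel)
--     'iran', 'iranian', 'tehran', 'iraq', 'iraqi', 'baghdad', 'syria', 'syrian', 'damascus', 'assad',
--     'lebanon', 'lebanese', 'beirut', 'hezbollah', 'jordan', 'jordanian', 'amman',
--     'egypt', 'egyptian', 'cairo', 'turkey', 'turkish', 'erdogan', 'istanbul', 'ankara',
--     'saudi', 'saudi arabia', 'riyadh', 'uae', 'emirates', 'dubai', 'qatar', 'doha',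
--     'kuwait', 'bahrain', 'oman', 'yemen', 'yemeni', 'houthi',
--     # Americas
--     'usa', 'united states', 'america', 'american', 'biden', 'canada', 'canadian', 'trudeau',
--     'mexico', 'mexican', 'brazil', 'brazilian', 'lula', 'argentina', 'chile', 'colombia',
--     'venezuela', 'peru', 'bolivia', 'uruguay', 'paraguay',
--     # Africa
--     'south africa', 'nigeria', 'kenya', 'ethiopia', 'ghana', 'morocco', 'algeria', 'tunisia', 'libya', 'sudan',
--     # Australia
--     'australia', 'australian', 'new zealand',
-- ]
--
-- # Index the keywords once by their first character, so the text is scanned in a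
-- # single left-to-right pass: at each position only the few keywords starting
-- # with that character are tried.
-- _BY_FIRST = {}
-- for _kw in _OTHER_COUNTRIES:
--     _BY_FIRST.setdefault(_kw[0], []).append(_kw)
--
--
-- def is_about_other_country(text):
--     """Check if content is about other countries (not Israel)"""
--     t = text.lower()
--     for i, c in enumerate(t):
--         for kw in _BY_FIRST.get(c, ()):
--             if t.startswith(kw, i):
--                 return True
--     return False
-- ===== Notes on version B (the rewrite author's own statement) =====
-- stated objective: alternative
-- what changed: Replaces the per-keyword whole-text substring scans with a single left-to-right pass over the text that, at each position, tries only the keywords indexed (once, up front) by their first character.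
import Mathlib
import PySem

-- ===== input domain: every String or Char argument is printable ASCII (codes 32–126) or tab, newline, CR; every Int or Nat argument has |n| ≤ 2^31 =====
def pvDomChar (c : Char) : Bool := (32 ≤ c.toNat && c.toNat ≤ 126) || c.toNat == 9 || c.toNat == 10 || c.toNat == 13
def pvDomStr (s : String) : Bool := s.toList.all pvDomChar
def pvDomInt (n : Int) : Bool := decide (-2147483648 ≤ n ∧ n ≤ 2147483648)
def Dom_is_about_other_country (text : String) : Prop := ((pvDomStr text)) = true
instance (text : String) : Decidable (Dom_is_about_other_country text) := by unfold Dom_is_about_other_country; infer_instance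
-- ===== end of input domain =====

-- B replaces A's one-whole-text-scan-per-keyword with a single left-to-right pass that at
-- each position tries only the keywords indexed once, up front, by first character
-- (objective: alternative algorithm; no speed claim).

-- ===== PORT A =====
def pvOtherCountries : List String := [
  -- Ukraine
  "ukraine", "ukrainian", "kyiv", "kharkiv", "odesa", "odessa", "luhansk", "donetsk", "kiev",
  -- Russia
  "russia", "russian", "putin", "kremlin", "moscow", "vladimir",
  -- Europe
  "france", "french", "macron", "paris", "germany", "german", "merkel", "scholz", "berlin",
  "uk", "british", "britain", "england", "london", "boris johnson", "rishi sunak",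
  "italy", "italian", "rome", "meloni", "spain", "spanish", "madrid", "poland", "sweden",
  "norway", "denmark", "netherlands", "belgium", "switzerland", "austria",
  -- Asia
  "china", "chinese", "beijing", "xi jinping", "japan", "japanese", "tokyo",
  "south korea", "korean", "seoul", "north korea", "pyongyang", "kim jong",
  "india", "indian", "modi", "pakistan", "bangladesh", "thailand", "vietnam",
  "singapore", "malaysia", "indonesia", "philippines", "myanmar", "cambodia",
  -- Middle East (non-Israel)
  "iran", "iranian", "tehran", "iraq", "iraqi", "baghdad", "syria", "syrian", "damascus", "assad",
  "lebanon", "lebanese", "beirut", "hezbollah", "jordan", "jordanian", "amman",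
  "egypt", "egyptian", "cairo", "turkey", "turkish", "erdogan", "istanbul", "ankara",
  "saudi", "saudi arabia", "riyadh", "uae", "emirates", "dubai", "qatar", "doha",
  "kuwait", "bahrain", "oman", "yemen", "yemeni", "houthi",
  -- Americas
  "usa", "united states", "america", "american", "biden", "canada", "canadian", "trudeau",
  "mexico", "mexican", "brazil", "brazilian", "lula", "argentina", "chile", "colombia",
  "venezuela", "peru", "bolivia", "uruguay", "paraguay",
  -- Africa
  "south africa", "nigeria", "kenya", "ethiopia", "ghana", "morocco", "algeria", "tunisia", "libya", "sudan",
  -- Australia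
  "australia", "australian", "new zealand"]

def is_about_other_country (text : String) : Bool :=
  let t := PySem.Str.lower text
  pvOtherCountries.any (fun kw => PySem.Str.isIn kw t)

-- ===== PORT B =====
-- Source B's _OTHER_COUNTRIES, at the List Char level on which B's scanner works
-- (the same keyword constants, written as code-point lists)
def pvKeywordsL : List (List Char) :=
[ ['u', 'k', 'r', 'a', 'i', 'n', 'e'],
  ['u', 'k', 'r', 'a', 'i', 'n', 'i', 'a', 'n'],
  ['k', 'y', 'i', 'v'],
  ['k', 'h', 'a', 'r', 'k', 'i', 'v'],
  ['o', 'd', 'e', 's', 'a'],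
  ['o', 'd', 'e', 's', 's', 'a'],
  ['l', 'u', 'h', 'a', 'n', 's', 'k'],
  ['d', 'o', 'n', 'e', 't', 's', 'k'],
  ['k', 'i', 'e', 'v'],
  ['r', 'u', 's', 's', 'i', 'a'],
  ['r', 'u', 's', 's', 'i', 'a', 'n'],
  ['p', 'u', 't', 'i', 'n'],
  ['k', 'r', 'e', 'm', 'l', 'i', 'n'],
  ['m', 'o', 's', 'c', 'o', 'w'],
  ['v', 'l', 'a', 'd', 'i', 'm', 'i', 'r'],
  ['f', 'r', 'a', 'n', 'c', 'e'],
  ['f', 'r', 'e', 'n', 'c', 'h'],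
  ['m', 'a', 'c', 'r', 'o', 'n'],
  ['p', 'a', 'r', 'i', 's'],
  ['g', 'e', 'r', 'm', 'a', 'n', 'y'],
  ['g', 'e', 'r', 'm', 'a', 'n'],
  ['m', 'e', 'r', 'k', 'e', 'l'],
  ['s', 'c', 'h', 'o', 'l', 'z'],
  ['b', 'e', 'r', 'l', 'i', 'n'],
  ['u', 'k'],
  ['b', 'r', 'i', 't', 'i', 's', 'h'],
  ['b', 'r', 'i', 't', 'a', 'i', 'n'],
  ['e', 'n', 'g', 'l', 'a', 'n', 'd'],
  ['l', 'o', 'n', 'd', 'o', 'n'],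
  ['b', 'o', 'r', 'i', 's', ' ', 'j', 'o', 'h', 'n', 's', 'o', 'n'],
  ['r', 'i', 's', 'h', 'i', ' ', 's', 'u', 'n', 'a', 'k'],
  ['i', 't', 'a', 'l', 'y'],
  ['i', 't', 'a', 'l', 'i', 'a', 'n'],
  ['r', 'o', 'm', 'e'],
  ['m', 'e', 'l', 'o', 'n', 'i'],
  ['s', 'p', 'a', 'i', 'n'],
  ['s', 'p', 'a', 'n', 'i', 's', 'h'],
  ['m', 'a', 'd', 'r', 'i', 'd'],
  ['p', 'o', 'l', 'a', 'n', 'd'],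
  ['s', 'w', 'e', 'd', 'e', 'n'],
  ['n', 'o', 'r', 'w', 'a', 'y'],
  ['d', 'e', 'n', 'm', 'a', 'r', 'k'],
  ['n', 'e', 't', 'h', 'e', 'r', 'l', 'a', 'n', 'd', 's'],
  ['b', 'e', 'l', 'g', 'i', 'u', 'm'],
  ['s', 'w', 'i', 't', 'z', 'e', 'r', 'l', 'a', 'n', 'd'],
  ['a', 'u', 's', 't', 'r', 'i', 'a'],
  ['c', 'h', 'i', 'n', 'a'],
  ['c', 'h', 'i', 'n', 'e', 's', 'e'],
  ['b', 'e', 'i', 'j', 'i', 'n', 'g'],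
  ['x', 'i', ' ', 'j', 'i', 'n', 'p', 'i', 'n', 'g'],
  ['j', 'a', 'p', 'a', 'n'],
  ['j', 'a', 'p', 'a', 'n', 'e', 's', 'e'],
  ['t', 'o', 'k', 'y', 'o'],
  ['s', 'o', 'u', 't', 'h', ' ', 'k', 'o', 'r', 'e', 'a'],
  ['k', 'o', 'r', 'e', 'a', 'n'],
  ['s', 'e', 'o', 'u', 'l'],
  ['n', 'o', 'r', 't', 'h', ' ', 'k', 'o', 'r', 'e', 'a'],
  ['p', 'y', 'o', 'n', 'g', 'y', 'a', 'n', 'g'],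
  ['k', 'i', 'm', ' ', 'j', 'o', 'n', 'g'],
  ['i', 'n', 'd', 'i', 'a'],
  ['i', 'n', 'd', 'i', 'a', 'n'],
  ['m', 'o', 'd', 'i'],
  ['p', 'a', 'k', 'i', 's', 't', 'a', 'n'],
  ['b', 'a', 'n', 'g', 'l', 'a', 'd', 'e', 's', 'h'],
  ['t', 'h', 'a', 'i', 'l', 'a', 'n', 'd'],
  ['v', 'i', 'e', 't', 'n', 'a', 'm'],
  ['s', 'i', 'n', 'g', 'a', 'p', 'o', 'r', 'e'],
  ['m', 'a', 'l', 'a', 'y', 's', 'i', 'a'],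
  ['i', 'n', 'd', 'o', 'n', 'e', 's', 'i', 'a'],
  ['p', 'h', 'i', 'l', 'i', 'p', 'p', 'i', 'n', 'e', 's'],
  ['m', 'y', 'a', 'n', 'm', 'a', 'r'],
  ['c', 'a', 'm', 'b', 'o', 'd', 'i', 'a'],
  ['i', 'r', 'a', 'n'],
  ['i', 'r', 'a', 'n', 'i', 'a', 'n'],
  ['t', 'e', 'h', 'r', 'a', 'n'],
  ['i', 'r', 'a', 'q'],
  ['i', 'r', 'a', 'q', 'i'],
  ['b', 'a', 'g', 'h', 'd', 'a', 'd'],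
  ['s', 'y', 'r', 'i', 'a'],
  ['s', 'y', 'r', 'i', 'a', 'n'],
  ['d', 'a', 'm', 'a', 's', 'c', 'u', 's'],
  ['a', 's', 's', 'a', 'd'],
  ['l', 'e', 'b', 'a', 'n', 'o', 'n'],
  ['l', 'e', 'b', 'a', 'n', 'e', 's', 'e'],
  ['b', 'e', 'i', 'r', 'u', 't'],
  ['h', 'e', 'z', 'b', 'o', 'l', 'l', 'a', 'h'],
  ['j', 'o', 'r', 'd', 'a', 'n'],
  ['j', 'o', 'r', 'd', 'a', 'n', 'i', 'a', 'n'],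
  ['a', 'm', 'm', 'a', 'n'],
  ['e', 'g', 'y', 'p', 't'],
  ['e', 'g', 'y', 'p', 't', 'i', 'a', 'n'],
  ['c', 'a', 'i', 'r', 'o'],
  ['t', 'u', 'r', 'k', 'e', 'y'],
  ['t', 'u', 'r', 'k', 'i', 's', 'h'],
  ['e', 'r', 'd', 'o', 'g', 'a', 'n'],
  ['i', 's', 't', 'a', 'n', 'b', 'u', 'l'],
  ['a', 'n', 'k', 'a', 'r', 'a'],
  ['s', 'a', 'u', 'd', 'i'],
  ['s', 'a', 'u', 'd', 'i', ' ', 'a', 'r', 'a', 'b', 'i', 'a'],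
  ['r', 'i', 'y', 'a', 'd', 'h'],
  ['u', 'a', 'e'],
  ['e', 'm', 'i', 'r', 'a', 't', 'e', 's'],
  ['d', 'u', 'b', 'a', 'i'],
  ['q', 'a', 't', 'a', 'r'],
  ['d', 'o', 'h', 'a'],
  ['k', 'u', 'w', 'a', 'i', 't'],
  ['b', 'a', 'h', 'r', 'a', 'i', 'n'],
  ['o', 'm', 'a', 'n'],
  ['y', 'e', 'm', 'e', 'n'],
  ['y', 'e', 'm', 'e', 'n', 'i'],
  ['h', 'o', 'u', 't', 'h', 'i'],
  ['u', 's', 'a'],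
  ['u', 'n', 'i', 't', 'e', 'd', ' ', 's', 't', 'a', 't', 'e', 's'],
  ['a', 'm', 'e', 'r', 'i', 'c', 'a'],
  ['a', 'm', 'e', 'r', 'i', 'c', 'a', 'n'],
  ['b', 'i', 'd', 'e', 'n'],
  ['c', 'a', 'n', 'a', 'd', 'a'],
  ['c', 'a', 'n', 'a', 'd', 'i', 'a', 'n'],
  ['t', 'r', 'u', 'd', 'e', 'a', 'u'],
  ['m', 'e', 'x', 'i', 'c', 'o'],
  ['m', 'e', 'x', 'i', 'c', 'a', 'n'],
  ['b', 'r', 'a', 'z', 'i', 'l'],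
  ['b', 'r', 'a', 'z', 'i', 'l', 'i', 'a', 'n'],
  ['l', 'u', 'l', 'a'],
  ['a', 'r', 'g', 'e', 'n', 't', 'i', 'n', 'a'],
  ['c', 'h', 'i', 'l', 'e'],
  ['c', 'o', 'l', 'o', 'm', 'b', 'i', 'a'],
  ['v', 'e', 'n', 'e', 'z', 'u', 'e', 'l', 'a'],
  ['p', 'e', 'r', 'u'],
  ['b', 'o', 'l', 'i', 'v', 'i', 'a'],
  ['u', 'r', 'u', 'g', 'u', 'a', 'y'],
  ['p', 'a', 'r', 'a', 'g', 'u', 'a', 'y'],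
  ['s', 'o', 'u', 't', 'h', ' ', 'a', 'f', 'r', 'i', 'c', 'a'],
  ['n', 'i', 'g', 'e', 'r', 'i', 'a'],
  ['k', 'e', 'n', 'y', 'a'],
  ['e', 't', 'h', 'i', 'o', 'p', 'i', 'a'],
  ['g', 'h', 'a', 'n', 'a'],
  ['m', 'o', 'r', 'o', 'c', 'c', 'o'],
  ['a', 'l', 'g', 'e', 'r', 'i', 'a'],
  ['t', 'u', 'n', 'i', 's', 'i', 'a'],
  ['l', 'i', 'b', 'y', 'a'],
  ['s', 'u', 'd', 'a', 'n'],
  ['a', 'u', 's', 't', 'r', 'a', 'l', 'i', 'a'],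
  ['a', 'u', 's', 't', 'r', 'a', 'l', 'i', 'a', 'n'],
  ['n', 'e', 'w', ' ', 'z', 'e', 'a', 'l', 'a', 'n', 'd'] ]

-- _kw[0]: exact via headD since every keyword in the list is nonempty
def pvKeyOf (kw : List Char) : Char := kw.headD ' '

-- the module-level setdefault/append indexing loop of Source B
def pvStep (d : PySem.Dict Char (List (List Char))) (kw : List Char) :
    PySem.Dict Char (List (List Char)) :=
  d.insert (pvKeyOf kw) (d.getD (pvKeyOf kw) [] ++ [kw])

def pvByFirst : PySem.Dict Char (List (List Char)) :=
  pvKeywordsL.foldl pvStep PySem.Dict.empty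

-- the single pass: at each suffix c :: rest (position i of t) try only _BY_FIRST.get(c, ())
def pvScan : List Char → Bool
  | [] => false
  | c :: rest =>
      ((pvByFirst.getD c []).any fun kw => PySem.Chars.startswith (c :: rest) kw)
      || pvScan rest

def is_about_other_country_alt (text : String) : Bool :=
  pvScan (PySem.Chars.lower text.toList)

-- ===== PRECONDITION & SPEC =====
def Spec_is_about_other_country (text : String) (out : Bool) : Prop := out = is_about_other_country_alt text
instance (text : String) (out : Bool) : Decidable (Spec_is_about_other_country text out) := by unfold Spec_is_about_other_country; infer_instance

-- ===== CLAIM (what is proved, stated in full; the proofs are below) =====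
def Claim_equal_is_about_other_country : Prop := ∀ (text : String), Dom_is_about_other_country text → Spec_is_about_other_country text (is_about_other_country text)

-- ===== LEMMAS AND PROOFS =====

-- A's keyword strings and B's keyword char lists are the same constants
theorem pvKw_eq : pvOtherCountries.map String.toList = pvKeywordsL := rfl

theorem pvNonemptyAll : pvKeywordsL.all (fun kw => !kw.isEmpty) = true := rfl

theorem pvNonempty : ∀ kw ∈ pvKeywordsL, kw ≠ [] := by
  intro kw hmem
  have h := List.all_eq_true.mp pvNonemptyAll kw hmem
  cases kw with
  | nil => simp [List.isEmpty] at h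
  | cons a l => exact List.cons_ne_nil a l

theorem pvMem_foldl (ks : List (List Char)) (d : PySem.Dict Char (List (List Char))) (c : Char)
    (kw : List Char) :
    kw ∈ (ks.foldl pvStep d).getD c [] ↔
      kw ∈ d.getD c [] ∨ (kw ∈ ks ∧ pvKeyOf kw = c) := by
  induction ks generalizing d with
  | nil => simp
  | cons k ks ih =>
    simp only [List.foldl_cons, ih, pvStep, PySem.Dict.getD_insert, List.mem_cons]
    by_cases h : c = pvKeyOf k
    · subst h
      rw [if_pos rfl]
      simp only [List.mem_append, List.mem_singleton]
      constructor
      · rintro ((hd | rfl) | ⟨hks, hkey⟩)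
        · exact Or.inl hd
        · exact Or.inr ⟨Or.inl rfl, rfl⟩
        · exact Or.inr ⟨Or.inr hks, hkey⟩
      · rintro (hd | ⟨(rfl | hks), hkey⟩)
        · exact Or.inl (Or.inl hd)
        · exact Or.inl (Or.inr rfl)
        · exact Or.inr ⟨hks, hkey⟩
    · simp only [if_neg h]
      constructor
      · rintro (hd | ⟨hks, hkey⟩)
        · exact Or.inl hd
        · exact Or.inr ⟨Or.inr hks, hkey⟩
      · rintro (hd | ⟨(rfl | hks), hkey⟩)
        · exact Or.inl hd
        · exact absurd hkey.symm h
        · exact Or.inr ⟨hks, hkey⟩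

theorem pvMem_byFirst (c : Char) (kw : List Char) :
    kw ∈ pvByFirst.getD c [] ↔ kw ∈ pvKeywordsL ∧ pvKeyOf kw = c := by
  rw [pvByFirst, pvMem_foldl]
  simp [PySem.Dict.getD_empty]

theorem pvScan_iff (l : List Char) :
    pvScan l = true ↔ ∃ kw ∈ pvKeywordsL, kw <:+: l := by
  induction l with
  | nil =>
    simp only [pvScan, Bool.false_eq_true, false_iff]
    rintro ⟨kw, hmem, hinf⟩
    exact pvNonempty kw hmem (List.infix_nil.mp hinf)
  | cons c rest ih =>
    simp only [pvScan, Bool.or_eq_true, List.any_eq_true, ih]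
    constructor
    · rintro (⟨kw, hmem, hsw⟩ | ⟨kw, hmem, hinf⟩)
      · exact ⟨kw, (pvMem_byFirst c kw).mp hmem |>.1,
          ((PySem.Chars.startswith_iff _ _).mp hsw).isInfix⟩
      · exact ⟨kw, hmem, hinf.trans (List.suffix_cons c rest).isInfix⟩
    · rintro ⟨kw, hmem, hinf⟩
      rcases List.infix_cons_iff.mp hinf with hpre | hinf'
      · left
        refine ⟨kw, ?_, (PySem.Chars.startswith_iff _ _).mpr hpre⟩
        rcases hkl : kw with _ | ⟨k0, kt⟩
        · exact absurd hkl (pvNonempty kw hmem)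
        · rw [hkl] at hpre
          rcases List.cons_prefix_cons.mp hpre with ⟨rfl, -⟩
          rw [← hkl]
          exact (pvMem_byFirst k0 kw).mpr ⟨hmem, by simp [pvKeyOf, hkl]⟩
      · exact Or.inr ⟨kw, hmem, hinf'⟩

theorem pvMain (text : String) :
    is_about_other_country text = is_about_other_country_alt text := by
  unfold is_about_other_country is_about_other_country_alt
  rw [Bool.eq_iff_iff]
  simp only [List.any_eq_true, PySem.Str.isIn_eq, PySem.Str.toList_lower, pvScan_iff]
  constructor
  · rintro ⟨kw, hmem, h⟩
    exact ⟨kw.toList, pvKw_eq ▸ List.mem_map_of_mem hmem,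
      (PySem.Chars.isIn_iff_infix _ _).mp h⟩
  · rintro ⟨kwL, hmem, h⟩
    rcases List.mem_map.mp (pvKw_eq ▸ hmem : kwL ∈ pvOtherCountries.map String.toList)
      with ⟨kw, hkw, rfl⟩
    exact ⟨kw, hkw, (PySem.Chars.isIn_iff_infix _ _).mpr h⟩

-- ===== VERDICT (by name: the statement is the Claim_ definition above) =====
theorem is_about_other_country_spec : Claim_equal_is_about_other_country := by
  intro text _
  unfold Spec_is_about_other_country
  exact pvMain text
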